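-- pv_equiv track=rewrite | github.com/Delphboy/ViGCap | utils/utils.py | preprocess_captions
-- ===== SOURCE A (Python) =====
-- from typing import List
--
-- def preprocess_captions(captions: List[str]) -> List[str]:
--     # Clean sentence list following: https://cs.stanford.edu/people/karpathy/cvpr2015.pdf Section 4
--     captions = [caption.lower() for caption in captions]
--
--     # Disgard non-alphanumeric characters
--     non_alphanumeric = [chr(i) for i in range(33, 128) if not chr(i).isalnum()]
--     cleaned = []
--
--     for sentence in captions:
--         for char in non_alphanumeric:
--             sentence = sentence.replace(char, "")
--         cleaned.append(sentence.strip())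
--         while "  " in sentence:
--             sentence = sentence.replace("  ", " ")
--     return cleaned
-- ===== SOURCE B (Python) =====
-- def preprocess_captions(captions):
--     # single pass per caption: keep a char iff it is alphanumeric or outside ord range 33..127
--     return [
--         ''.join(c for c in s.lower() if c.isalnum() or not (33 <= ord(c) < 128)).strip()
--         for s in captions
--     ]
-- ===== Notes on version B (the rewrite author's own statement) =====
-- stated objective: simpler
-- what changed: Replaced the loop over ~60 forbidden characters doing a whole-string replace each (plus a dead double-space while loop) with a single character-filter pass per caption.
import Mathlib
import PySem

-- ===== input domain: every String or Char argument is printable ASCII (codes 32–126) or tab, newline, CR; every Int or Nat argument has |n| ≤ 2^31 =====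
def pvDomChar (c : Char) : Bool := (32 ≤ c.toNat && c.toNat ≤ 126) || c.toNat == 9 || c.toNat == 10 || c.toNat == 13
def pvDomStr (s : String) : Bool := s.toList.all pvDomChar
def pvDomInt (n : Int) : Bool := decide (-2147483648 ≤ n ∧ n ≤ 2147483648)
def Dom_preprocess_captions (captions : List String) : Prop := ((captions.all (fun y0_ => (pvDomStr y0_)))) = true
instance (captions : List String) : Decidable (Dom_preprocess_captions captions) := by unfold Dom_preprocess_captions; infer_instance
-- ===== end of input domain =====

-- B replaces A's loop of whole-string replaces over every forbidden character (and A's dead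
-- double-space while loop, which never affects the output) with one character-filter pass per caption.

-- ===== PORT A =====
-- non_alphanumeric = [chr(i) for i in range(33, 128) if not chr(i).isalnum()]   (chr(i) ported as Char)
def pvPunct : List Char :=
  ((PySem.List.pyRange 33 128 1).filter
      (fun i => !(PySem.Chars.isalnum (Char.ofNat i.toNat)))).map (fun i => Char.ofNat i.toNat)

-- while "  " in sentence: sentence = sentence.replace("  ", " ")  — each pass strictly shortens the
-- string, so fuel = length is enough for the loop to run to completion exactly as in Python; the
-- resulting value is discarded by A (dead code), matching the Python.
def pvCollapse : Nat → String → String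
  | 0, s => s
  | fuel + 1, s =>
      if PySem.Str.isIn "  " s then pvCollapse fuel (PySem.Str.replace s "  " " ") else s

def preprocess_captions (captions : List String) : List String :=
  let captions := captions.map PySem.Str.lower
  captions.foldl
    (fun cleaned sentence =>
      let sentence := pvPunct.foldl (fun s c => PySem.Str.replace s (String.ofList [c]) "") sentence
      let cleaned := cleaned ++ [PySem.Str.strip sentence]
      let _ := pvCollapse (PySem.Str.len sentence).toNat sentence  -- dead while loop, value unused
      cleaned)
    []

-- ===== PORT B =====
def preprocess_captions_alt (captions : List String) : List String :=
  captions.map (fun s =>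
    PySem.Str.strip (String.ofList ((PySem.Str.lower s).toList.filter
      (fun c => PySem.Chars.isalnum c || !(decide (33 ≤ c.toNat) && decide (c.toNat < 128))))))

-- ===== PRECONDITION & SPEC =====
def Spec_preprocess_captions (captions : List String) (out : List String) : Prop := out = preprocess_captions_alt captions
instance (captions : List String) (out : List String) : Decidable (Spec_preprocess_captions captions out) := by unfold Spec_preprocess_captions; infer_instance

-- ===== CLAIM (what is proved, stated in full; the proofs are below) =====
def Claim_equal_preprocess_captions : Prop := ∀ (captions : List String), Dom_preprocess_captions captions → Spec_preprocess_captions captions (preprocess_captions captions)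

-- ===== LEMMAS AND PROOFS =====

-- replace s [a] "" deletes every occurrence of a, i.e. filters it out
theorem replace_go_single (a : Char) (l : List Char) : ∀ (fuel : Nat) (acc : List Char),
    l.length ≤ fuel →
    PySem.Chars.replace.go [a] [] fuel l acc = acc.reverse ++ l.filter (fun c => c != a) := by
  induction l with
  | nil =>
      intro fuel acc _
      cases fuel <;> simp [PySem.Chars.replace.go]
  | cons c t ih =>
      intro fuel acc hf
      cases fuel with
      | zero => simp at hf
      | succ fuel =>
          have ht : t.length ≤ fuel := by simpa using hf
          by_cases h : a = c
          · subst h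
            simp [PySem.Chars.replace.go, List.isPrefixOf, ih fuel acc ht]
          · have hb : (a == c) = false := by simpa using h
            have hc : (c != a) = true := by simp [bne]; exact fun he => h he.symm
            simp [PySem.Chars.replace.go, List.isPrefixOf, hb, hc, ih fuel (c :: acc) ht]

theorem replace_single (a : Char) (l : List Char) :
    PySem.Chars.replace l [a] [] = l.filter (fun c => c != a) := by
  simp [PySem.Chars.replace, replace_go_single a l l.length [] le_rfl]

-- folding single-char replaces over a list of chars filters out all of them
theorem foldl_replace_filter (ps : List Char) : ∀ (s : String),
    (ps.foldl (fun s c => PySem.Str.replace s (String.ofList [c]) "") s).toList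
      = s.toList.filter (fun x => !ps.contains x) := by
  induction ps with
  | nil => intro s; simp
  | cons p t ih =>
      intro s
      simp only [List.foldl_cons, ih, PySem.Str.toList_replace]
      have h1 : (String.ofList [p]).toList = [p] := String.toList_ofList
      have h2 : ("" : String).toList = [] := rfl
      rw [h1, h2, replace_single, List.filter_filter]
      apply List.filter_congr
      intro x _
      by_cases h : x = p <;> simp [h]

-- key character fact, checked on all 128 relevant codes
set_option maxRecDepth 20000 in
theorem punct_char_fin : ∀ n : Fin 128,
    (!pvPunct.contains (Char.ofNat n.val))
      = (PySem.Chars.isalnum (Char.ofNat n.val)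
          || !(decide (33 ≤ (Char.ofNat n.val).toNat) && decide ((Char.ofNat n.val).toNat < 128))) := by
  decide

theorem punct_char (c : Char) (h : c.toNat < 128) :
    (!pvPunct.contains c)
      = (PySem.Chars.isalnum c || !(decide (33 ≤ c.toNat) && decide (c.toNat < 128))) := by
  have hc : Char.ofNat c.toNat = c := Char.ofNat_toNat c
  have := punct_char_fin ⟨c.toNat, h⟩
  simpa [hc] using this

set_option maxRecDepth 20000 in
theorem lowerChar_lt_fin : ∀ n : Fin 128, (PySem.Chars.lowerChar (Char.ofNat n.val)).toNat < 128 := by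
  decide

theorem lowerChar_lt (c : Char) (h : c.toNat < 128) : (PySem.Chars.lowerChar c).toNat < 128 := by
  have hc : Char.ofNat c.toNat = c := Char.ofNat_toNat c
  have := lowerChar_lt_fin ⟨c.toNat, h⟩
  simpa [hc] using this

theorem foldl_snoc {α β : Type} (f : α → β) : ∀ (l : List α) (acc : List β),
    l.foldl (fun out x => out ++ [f x]) acc = acc ++ l.map f := by
  intro l
  induction l with
  | nil => simp
  | cons x t ih => intro acc; simp [ih]

theorem domChar_lt (c : Char) (h : pvDomChar c = true) : c.toNat < 128 := by
  unfold pvDomChar at h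
  simp only [Bool.or_eq_true, Bool.and_eq_true, decide_eq_true_eq, beq_iff_eq] at h
  omega

-- ===== VERDICT (by name: the statement is the Claim_ definition above) =====
set_option maxHeartbeats 1000000 in
theorem clean_sentence (s : String) (hs : pvDomStr s = true) :
    PySem.Str.strip (pvPunct.foldl (fun t c => PySem.Str.replace t (String.ofList [c]) "") (PySem.Str.lower s))
      = PySem.Str.strip (String.ofList ((PySem.Str.lower s).toList.filter
          (fun c => PySem.Chars.isalnum c || !(decide (33 ≤ c.toNat) && decide (c.toNat < 128))))) := by
  unfold PySem.Str.strip
  apply congrArg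
  apply congrArg
  rw [foldl_replace_filter]
  rw [String.toList_ofList]
  apply List.filter_congr
  intro c hc
  have hlt : c.toNat < 128 := by
    rw [PySem.Str.toList_lower] at hc
    unfold PySem.Chars.lower at hc
    rcases List.mem_map.mp hc with ⟨c0, hc0, rfl⟩
    have hd : pvDomChar c0 = true := by
      unfold pvDomStr at hs
      exact List.all_eq_true.mp hs c0 hc0
    exact lowerChar_lt c0 (domChar_lt c0 hd)
  exact punct_char c hlt

theorem preprocess_captions_spec : Claim_equal_preprocess_captions := by
  intro captions hdom
  unfold Spec_preprocess_captions
  show (captions.map PySem.Str.lower).foldl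
      (fun cleaned sentence =>
        cleaned ++ [PySem.Str.strip (pvPunct.foldl (fun t c => PySem.Str.replace t (String.ofList [c]) "") sentence)])
      [] = preprocess_captions_alt captions
  rw [foldl_snoc]
  unfold preprocess_captions_alt
  simp only [List.nil_append, List.map_map]
  apply List.map_congr_left
  intro s hs
  have hd : pvDomStr s = true := List.all_eq_true.mp hdom s hs
  exact clean_sentence s hd
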